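-- pv_equiv track=rewrite | github.com/ROUJINN/SceneAssistant | main.py | validate_action_batch
-- ===== SOURCE A (Python) =====
-- def validate_action_batch(actions):
--     """
--     Validate that Create and Duplicate actions are not mixed with other actions.
--
--     Returns:
--         (valid: bool, message: str)
--     """
--     create_duplicate_actions = {"Create", "Duplicate"}
--     modify_actions = {"Rotate", "Place", "Scale", "Translate"}
--
--     has_create_or_duplicate = any(
--         action.get("type") in create_duplicate_actions for action in actions
--     )
--     has_modify_action = any(
--         action.get("type") in modify_actions for action in actions
--     )
--
--     if has_create_or_duplicate and has_modify_action:
--         return (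
--             False,
--             "Invalid action batch: Create and Duplicate actions must be executed in a separate batch. Do not mix Create/Duplicate with other actions (e.g., Rotate, Place, Scale, etc.) in the same batch.",
--         )
--
--     return True, None
-- ===== SOURCE B (Python) =====
-- def validate_action_batch(actions):
--     """
--     Validate that Create and Duplicate actions are not mixed with other actions.
--
--     Returns:
--         (valid: bool, message: str)
--     """
--     create_duplicate_actions = {"Create", "Duplicate"}
--     modify_actions = {"Rotate", "Place", "Scale", "Translate"}
--
--     has_create_or_duplicate = False
--     has_modify_action = False
--     for action in actions:
--         t = action.get("type")
--         if t in create_duplicate_actions: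
--             has_create_or_duplicate = True
--         if t in modify_actions:
--             has_modify_action = True
--         if has_create_or_duplicate and has_modify_action:
--             break
--
--     if has_create_or_duplicate and has_modify_action:
--         return (
--             False,
--             "Invalid action batch: Create and Duplicate actions must be executed in a separate batch. Do not mix Create/Duplicate with other actions (e.g., Rotate, Place, Scale, etc.) in the same batch.",
--         )
--
--     return True, None
-- ===== Notes on version B (the rewrite author's own statement) =====
-- stated objective: alternative
-- what changed: Replaced the two separate any(...) passes over actions with a single loop maintaining both flags and breaking early once both are set.
import Mathlib
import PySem

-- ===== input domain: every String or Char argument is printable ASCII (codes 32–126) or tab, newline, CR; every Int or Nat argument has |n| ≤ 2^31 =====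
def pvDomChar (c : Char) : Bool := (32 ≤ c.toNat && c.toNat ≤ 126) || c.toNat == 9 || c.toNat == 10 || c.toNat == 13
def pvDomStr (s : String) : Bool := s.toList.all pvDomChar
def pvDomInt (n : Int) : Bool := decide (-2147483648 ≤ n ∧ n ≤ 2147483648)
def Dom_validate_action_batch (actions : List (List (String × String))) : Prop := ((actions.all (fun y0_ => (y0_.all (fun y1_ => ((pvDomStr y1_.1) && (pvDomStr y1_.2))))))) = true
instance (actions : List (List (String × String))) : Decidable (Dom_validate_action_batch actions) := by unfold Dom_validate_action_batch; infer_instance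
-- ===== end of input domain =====

-- ===== PORT A =====
-- B changes: one loop maintaining both flags with early break, instead of two any(...) passes (alternative decomposition, same cost).
-- x in {"Create","Duplicate"} where x may be None: membership of the optional get result
def vabTypeIn (action : List (String × String)) (s : PySem.Set String) : Bool :=
  match PySem.Dict.get? (PySem.Dict.mk action) "type" with
  | some t => PySem.Set.contains s t
  | none => false

def validate_action_batch (actions : List (List (String × String))) : Bool × Option String :=
  let create_duplicate_actions : PySem.Set String := PySem.Set.ofList ["Create", "Duplicate"]
  let modify_actions : PySem.Set String := PySem.Set.ofList ["Rotate", "Place", "Scale", "Translate"]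
  let has_create_or_duplicate := actions.any (fun action => vabTypeIn action create_duplicate_actions)
  let has_modify_action := actions.any (fun action => vabTypeIn action modify_actions)
  if has_create_or_duplicate && has_modify_action then
    (false, some "Invalid action batch: Create and Duplicate actions must be executed in a separate batch. Do not mix Create/Duplicate with other actions (e.g., Rotate, Place, Scale, etc.) in the same batch.")
  else
    (true, none)

-- ===== PORT B =====
-- the single loop of Source B: carries both flags, breaks early once both are set
def vabLoop : List (List (String × String)) → Bool → Bool → Bool × Bool
  | [], hcd, hmod => (hcd, hmod)
  | action :: rest, hcd, hmod =>
    let hcd := hcd || vabTypeIn action (PySem.Set.ofList ["Create", "Duplicate"])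
    let hmod := hmod || vabTypeIn action (PySem.Set.ofList ["Rotate", "Place", "Scale", "Translate"])
    if hcd && hmod then (hcd, hmod) else vabLoop rest hcd hmod

def validate_action_batch_alt (actions : List (List (String × String))) : Bool × Option String :=
  let flags := vabLoop actions false false
  if flags.1 && flags.2 then
    (false, some "Invalid action batch: Create and Duplicate actions must be executed in a separate batch. Do not mix Create/Duplicate with other actions (e.g., Rotate, Place, Scale, etc.) in the same batch.")
  else
    (true, none)

-- ===== PRECONDITION & SPEC =====
def Spec_validate_action_batch (actions : List (List (String × String))) (out : Bool × Option String) : Prop := out = validate_action_batch_alt actions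
instance (actions : List (List (String × String))) (out : Bool × Option String) : Decidable (Spec_validate_action_batch actions out) := by unfold Spec_validate_action_batch; infer_instance

-- ===== CLAIM (what is proved, stated in full; the proofs are below) =====
def Claim_equal_validate_action_batch : Prop := ∀ (actions : List (List (String × String))), Dom_validate_action_batch actions → Spec_validate_action_batch actions (validate_action_batch actions)

-- ===== LEMMAS AND PROOFS =====
theorem vabLoop_eq (actions : List (List (String × String))) (hcd hmod : Bool) :
    vabLoop actions hcd hmod =
      ((hcd || actions.any (fun a => vabTypeIn a (PySem.Set.ofList ["Create", "Duplicate"]))),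
       (hmod || actions.any (fun a => vabTypeIn a (PySem.Set.ofList ["Rotate", "Place", "Scale", "Translate"])))) := by
  induction actions generalizing hcd hmod with
  | nil => simp [vabLoop]
  | cons a rest ih =>
    simp only [vabLoop, List.any_cons]
    split
    · rename_i h
      simp only [Bool.and_eq_true] at h
      obtain ⟨h1, h2⟩ := h
      simp [← Bool.or_assoc, h1, h2]
    · rw [ih]
      simp [Bool.or_assoc]

-- ===== VERDICT (by name: the statement is the Claim_ definition above) =====
theorem validate_action_batch_spec : Claim_equal_validate_action_batch := by
  intro actions _
  show _ = _
  simp [validate_action_batch, validate_action_batch_alt, vabLoop_eq]
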